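-- pv_equiv track=rewrite | github.com/pypi-data/pypi-mirror-401 | packages/reposcope-ai/reposcope_ai-0.10.0-py3-none-any.whl/reposcope/src/analyzers/risks.py | _env_keys_without_comments
-- ===== SOURCE A (Python) =====
-- def _env_keys_without_comments(text: str) -> list[str]:
--     keys: list[str] = []
--     prev_nonempty = ""
--     for raw in text.splitlines()[:5000]:
--         line = raw.strip()
--         if not line:
--             continue
--         if line.startswith("#"):
--             prev_nonempty = line
--             continue
--         if "=" not in line or line.startswith("export "):
--             prev_nonempty = line
--             continue
--         k = line.split("=", 1)[0].strip()
--         if not k or " " in k: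
--             prev_nonempty = line
--             continue
--         if not prev_nonempty.startswith("#"):
--             keys.append(k)
--         prev_nonempty = line
--     return keys
-- ===== SOURCE B (Python) =====
-- def _env_keys_without_comments(text: str) -> list[str]:
--     lines = [l.strip() for l in text.splitlines()[:5000] if l.strip()]
--     comment_at = {i for i, l in enumerate(lines) if l.startswith("#")}
--
--     def key_of(l):
--         if l.startswith("#") or "=" not in l or l.startswith("export "):
--             return None
--         k = l.split("=", 1)[0].strip()
--         return k if k and " " not in k else None
--
--     return [k for i, l in enumerate(lines)
--             if (k := key_of(l)) is not None and i - 1 not in comment_at]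
-- ===== Notes on version B (the rewrite author's own statement) =====
-- stated objective: alternative
-- what changed: B precomputes a hash set of the indices of comment lines among the stripped non-empty lines, then selects keys with a single comprehension that checks whether the predecessor index is in that set, eliminating A's threaded prev_nonempty accumulator and its per-branch updates.
import Mathlib
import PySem

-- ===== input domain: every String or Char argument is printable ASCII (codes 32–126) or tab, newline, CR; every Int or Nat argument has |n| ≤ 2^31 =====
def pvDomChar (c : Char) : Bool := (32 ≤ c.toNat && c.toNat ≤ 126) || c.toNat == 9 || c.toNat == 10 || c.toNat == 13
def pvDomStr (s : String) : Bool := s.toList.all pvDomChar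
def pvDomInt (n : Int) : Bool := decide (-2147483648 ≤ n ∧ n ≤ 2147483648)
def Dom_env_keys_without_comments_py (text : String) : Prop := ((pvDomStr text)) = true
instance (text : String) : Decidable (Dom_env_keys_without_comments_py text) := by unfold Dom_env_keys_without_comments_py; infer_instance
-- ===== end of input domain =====

-- B precomputes the set of indices of comment lines among the stripped non-empty lines
-- and selects keys by an 'i-1 ∈ comment set' lookup, replacing A's threaded prev_nonempty
-- accumulator (objective: alternative decomposition, same cost).

-- ===== PORT A =====
def env_keys_without_comments_py (text : String) : List String :=
  ((PySem.List.slice (PySem.Str.splitlines text) none (some 5000)).foldl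
    (fun (st : List String × String) raw =>
      let line := PySem.Str.strip raw
      if line = "" then st
      else if PySem.Str.startswith line "#" then (st.1, line)
      else if (!(PySem.Str.isIn "=" line)) || PySem.Str.startswith line "export " then (st.1, line)
      else
        let k := PySem.Str.strip (((PySem.Str.splitMax? line "=" 1).getD []).headD "")
        if k = "" ∨ PySem.Str.isIn " " k then (st.1, line)
        else if !(PySem.Str.startswith st.2 "#") then (st.1 ++ [k], line)
        else (st.1, line))
    ([], "")).1

-- ===== PORT B =====
/-- B's helper key_of -/
def pvKeyOf (l : String) : Option String :=
  if PySem.Str.startswith l "#" || !(PySem.Str.isIn "=" l) || PySem.Str.startswith l "export " then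
    none
  else
    let k := PySem.Str.strip (((PySem.Str.splitMax? l "=" 1).getD []).headD "")
    if k ≠ "" ∧ ¬ PySem.Str.isIn " " k then some k else none

def env_keys_without_comments_py_alt (text : String) : List String :=
  let lines := ((PySem.List.slice (PySem.Str.splitlines text) none (some 5000)).filter
      (fun l => PySem.Str.strip l ≠ "")).map PySem.Str.strip
  let commentAt : PySem.Set Int := PySem.Set.ofList
      (((PySem.List.enumerate lines).filter (fun p => PySem.Str.startswith p.2 "#")).map (·.1))
  (PySem.List.enumerate lines).filterMap (fun p =>
    match pvKeyOf p.2 with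
    | some k => if (p.1 - 1) ∈ commentAt then none else some k
    | none => none)

-- ===== PRECONDITION & SPEC =====
def Spec_env_keys_without_comments_py (text : String) (out : List String) : Prop := out = env_keys_without_comments_py_alt text
instance (text : String) (out : List String) : Decidable (Spec_env_keys_without_comments_py text out) := by unfold Spec_env_keys_without_comments_py; infer_instance

-- ===== CLAIM (what is proved, stated in full; the proofs are below) =====
def Claim_equal_env_keys_without_comments_py : Prop := ∀ (text : String), Dom_env_keys_without_comments_py text → Spec_env_keys_without_comments_py text (env_keys_without_comments_py text)

-- ===== LEMMAS AND PROOFS =====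

/-- what one non-empty stripped line contributes, given the previous non-empty stripped line -/
def pvEmit (prev line : String) : List String :=
  match pvKeyOf line with
  | none => []
  | some k => if PySem.Str.startswith prev "#" then [] else [k]

/-- recursive form of the look-back pass -/
def pvCore (prev : String) : List String → List String
  | [] => []
  | l :: ls => pvEmit prev l ++ pvCore l ls

/-- A's loop body, named (definitionally equal to the lambda in the port of A) -/
def pvStepA (st : List String × String) (raw : String) : List String × String :=
  let line := PySem.Str.strip raw
  if line = "" then st
  else if PySem.Str.startswith line "#" then (st.1, line)
  else if (!(PySem.Str.isIn "=" line)) || PySem.Str.startswith line "export " then (st.1, line)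
  else
    let k := PySem.Str.strip (((PySem.Str.splitMax? line "=" 1).getD []).headD "")
    if k = "" ∨ PySem.Str.isIn " " k then (st.1, line)
    else if !(PySem.Str.startswith st.2 "#") then (st.1 ++ [k], line)
    else (st.1, line)

/-- pvEmit written with A's branch conditions -/
theorem pvEmit_char (prev l : String) :
    pvEmit prev l =
      if PySem.Str.startswith l "#" then []
      else if (!(PySem.Str.isIn "=" l)) || PySem.Str.startswith l "export " then []
      else if PySem.Str.strip (((PySem.Str.splitMax? l "=" 1).getD []).headD "") = "" ∨
              PySem.Str.isIn " " (PySem.Str.strip (((PySem.Str.splitMax? l "=" 1).getD []).headD "")) then []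
      else if PySem.Str.startswith prev "#" then []
      else [PySem.Str.strip (((PySem.Str.splitMax? l "=" 1).getD []).headD "")] := by
  simp only [pvEmit, pvKeyOf]
  generalize PySem.Str.strip (((PySem.Str.splitMax? l "=" 1).getD []).headD "") = k
  generalize PySem.Str.startswith l "#" = b1
  generalize PySem.Str.isIn "=" l = b2
  generalize PySem.Str.startswith l "export " = b3
  generalize PySem.Str.isIn " " k = b4
  generalize PySem.Str.startswith prev "#" = b5
  by_cases hk : k = "" <;> cases b1 <;> cases b2 <;> cases b3 <;> cases b4 <;> cases b5 <;>
    simp [hk]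

theorem pvStepA_eq (acc : List String) (p raw : String) :
    pvStepA (acc, p) raw =
      if PySem.Str.strip raw = "" then (acc, p)
      else (acc ++ pvEmit p (PySem.Str.strip raw), PySem.Str.strip raw) := by
  simp only [pvStepA]
  rw [pvEmit_char]
  generalize PySem.Str.strip raw = line
  generalize PySem.Str.strip (((PySem.Str.splitMax? line "=" 1).getD []).headD "") = k
  generalize PySem.Str.startswith line "#" = b1
  generalize PySem.Str.isIn "=" line = b2
  generalize PySem.Str.startswith line "export " = b3
  generalize PySem.Str.isIn " " k = b4
  generalize PySem.Str.startswith p "#" = b5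
  by_cases h1 : line = "" <;> by_cases hk : k = "" <;>
    cases b1 <;> cases b2 <;> cases b3 <;> cases b4 <;> cases b5 <;> simp [h1, hk]

theorem pvA_fold (ls : List String) : ∀ (acc : List String) (p : String),
    ((ls.foldl pvStepA (acc, p)).1)
    = acc ++ pvCore p ((ls.filter (fun l => PySem.Str.strip l ≠ "")).map PySem.Str.strip) := by
  induction ls with
  | nil => intro acc p; simp [pvCore]
  | cons raw rest ih =>
    intro acc p
    rw [List.foldl_cons, pvStepA_eq, List.filter_cons]
    by_cases h : PySem.Str.strip raw = ""
    · simp [h, ih]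
    · simp [h, pvCore, ih, List.append_assoc]

/-- indices in B's comment set are exactly the positions of '#'-lines -/
theorem pv_mem_commentAt (fl : List String) (j : Int) :
    j ∈ (PySem.Set.ofList
        (((PySem.List.enumerate fl).filter (fun p => PySem.Str.startswith p.2 "#")).map (·.1))
        : PySem.Set Int)
    ↔ ∃ (k : Nat) (h : k < fl.length), j = (k : Int) ∧ PySem.Str.startswith fl[k] "#" = true := by
  rw [PySem.Set.mem_ofList]
  simp only [List.mem_map, List.mem_filter, PySem.List.mem_enumerate_iff]
  constructor
  · rintro ⟨p, ⟨⟨k, hk, rfl⟩, hc⟩, rfl⟩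
    exact ⟨k, hk, by simp, by simpa using hc⟩
  · rintro ⟨k, hk, rfl, hc⟩
    exact ⟨((0 : Int) + k, fl[k]), ⟨⟨k, hk, rfl⟩, by simpa using hc⟩, by simp⟩

theorem pvB_fold (S : PySem.Set Int) :
    ∀ (suf : List String) (i : Nat) (prev : String),
    (((i : Int) - 1) ∈ S ↔ PySem.Str.startswith prev "#" = true) →
    (∀ (k : Nat), ((i : Int) + (k : Int)) ∈ S ↔
        ∃ (h : k < suf.length), PySem.Str.startswith suf[k] "#" = true) →
    (PySem.List.enumerate suf (i : Int)).filterMap (fun p =>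
        match pvKeyOf p.2 with
        | some k => if (p.1 - 1) ∈ S then none else some k
        | none => none)
      = pvCore prev suf := by
  intro suf
  induction suf with
  | nil => intro i prev _ _; simp [PySem.List.enumerate_nil, pvCore]
  | cons l ls ih =>
    intro i prev hb hs
    rw [PySem.List.enumerate_cons, List.filterMap_cons]
    have h0 : (((i + 1 : Nat) : Int) - 1) ∈ S ↔ PySem.Str.startswith l "#" = true := by
      have h := hs 0
      have harith : ((i : Int) + ((0 : Nat) : Int)) = ((i + 1 : Nat) : Int) - 1 := by
        push_cast; ring
      rw [harith] at h
      simpa using h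
    have hrest : (∀ (k : Nat), (((i + 1 : Nat) : Int) + (k : Int)) ∈ S ↔
        ∃ (h : k < ls.length), PySem.Str.startswith ls[k] "#" = true) := by
      intro k
      have h := hs (k + 1)
      have harith : ((i : Int) + ((k + 1 : Nat) : Int)) = ((i + 1 : Nat) : Int) + (k : Int) := by
        push_cast; ring
      rw [harith] at h
      simpa using h
    have htail := ih (i + 1) l h0 hrest
    have hcast : ((i : Int) + 1) = ((i + 1 : Nat) : Int) := by push_cast; ring
    rw [hcast, htail, pvCore]
    cases hko : pvKeyOf l with
    | none => simp [pvEmit, hko]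
    | some k =>
      simp only [pvEmit, hko]
      have hconv : PySem.Str.startswith prev "#" = PySem.Chars.startswith prev.toList ['#'] := rfl
      by_cases hin : ((i : Int)) - 1 ∈ S
      · have hp : PySem.Chars.startswith prev.toList ['#'] = true := hconv ▸ hb.mp hin
        simp [hin, hp]
      · have hp : ¬ PySem.Chars.startswith prev.toList ['#'] = true :=
          fun hx => hin (hb.mpr (hconv ▸ hx))
        simp [hin, hp]

-- ===== VERDICT (by name: the statement is the Claim_ definition above) =====
theorem env_keys_without_comments_py_spec : Claim_equal_env_keys_without_comments_py := by
  intro text _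
  unfold Spec_env_keys_without_comments_py
  have hA : env_keys_without_comments_py text
      = ((PySem.List.slice (PySem.Str.splitlines text) none (some 5000)).foldl pvStepA ([], "")).1 := rfl
  rw [hA, pvA_fold]
  set fl := ((PySem.List.slice (PySem.Str.splitlines text) none (some 5000)).filter
      (fun l => PySem.Str.strip l ≠ "")).map PySem.Str.strip with hfl
  set S : PySem.Set Int := PySem.Set.ofList
      (((PySem.List.enumerate fl).filter (fun p => PySem.Str.startswith p.2 "#")).map (·.1)) with hSdef
  have hB : env_keys_without_comments_py_alt text
      = (PySem.List.enumerate fl).filterMap (fun p =>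
          match pvKeyOf p.2 with
          | some k => if (p.1 - 1) ∈ S then none else some k
          | none => none) := rfl
  have hb : ((((0 : Nat)) : Int) - 1) ∈ S ↔ PySem.Str.startswith "" "#" = true := by
    constructor
    · intro h
      rcases (pv_mem_commentAt fl _).1 h with ⟨m, _, hm, _⟩
      omega
    · intro h
      exact absurd h (by decide)
  have hs : ∀ (k : Nat), (((0 : Nat) : Int) + (k : Int)) ∈ S ↔
      ∃ (h : k < fl.length), PySem.Str.startswith fl[k] "#" = true := by
    intro k
    rw [hSdef, pv_mem_commentAt]
    constructor
    · rintro ⟨m, hm, hEq, hc⟩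
      have hmk : m = k := by omega
      subst hmk
      exact ⟨hm, hc⟩
    · rintro ⟨hk, hc⟩
      exact ⟨k, hk, by push_cast; ring, hc⟩
  have hfold := pvB_fold S fl 0 "" hb hs
  simp only [Nat.cast_zero] at hfold
  rw [hB, hfold]
  simp
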